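-- pv_equiv track=rewrite | github.com/JQueimado/Universidade | TrabP1/2ªParte.zip/37561-38176-14452-2ªParte.py | Seth
-- ===== SOURCE A (Python) =====
-- def Seth(x,y,w,l):
--     lst=list(l[y])
--     rl=list(l)
--     for xx in range(len(w)):
--         if lst[x+xx]==' ' or lst[x+xx]==w[xx]:
--             lst[x+xx]=w[xx]
--         else:
--             return rl
--     l[y]=lst
--     return l
-- ===== SOURCE B (Python) =====
-- def Seth(x, y, w, l):
--     row = l[y]
--     if all(row[x + i] == ' ' or row[x + i] == w[i] for i in range(len(w))):
--         lst = list(row)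
--         for i in range(len(w)):
--             lst[x + i] = w[i]
--         l[y] = lst
--         return l
--     return list(l)
-- ===== Notes on version B (the rewrite author's own statement) =====
-- stated objective: idiomatic
-- what changed: B replaces A's interleaved check-write-early-return loop with a pure validation pass (all(...)) over the untouched row followed by a separate write pass.
-- outside the precondition, e.g. on Seth(-1, 0, 'ab', [[' ']]): A returns [[' ']], B returns [['b']]
import Mathlib
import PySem

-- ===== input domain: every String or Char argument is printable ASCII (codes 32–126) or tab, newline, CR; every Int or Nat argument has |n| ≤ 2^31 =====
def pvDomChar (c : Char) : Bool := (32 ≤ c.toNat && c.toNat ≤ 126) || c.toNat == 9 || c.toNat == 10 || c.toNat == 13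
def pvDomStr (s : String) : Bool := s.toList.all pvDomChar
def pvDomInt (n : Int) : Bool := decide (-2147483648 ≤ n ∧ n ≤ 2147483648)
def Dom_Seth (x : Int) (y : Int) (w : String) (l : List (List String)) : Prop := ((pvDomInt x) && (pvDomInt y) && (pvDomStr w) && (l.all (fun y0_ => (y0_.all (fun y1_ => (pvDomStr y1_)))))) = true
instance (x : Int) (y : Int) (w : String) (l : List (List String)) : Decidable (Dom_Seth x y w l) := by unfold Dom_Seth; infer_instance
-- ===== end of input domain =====

-- B splits A's interleaved check-write-early-return loop into a pure validation pass over the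
-- untouched row followed by a separate write pass. Both A and B mutate l in place on success
-- (l[y] = new row); the equivalence proved here is about the return value.

-- ===== PORT A =====
-- A's for-loop: reads lst[x+xx] and w[xx], writes lst[x+xx] on a match, 'return rl' → none.
def SethGo (x : Int) (w : String) : List Int → List String → Option (List String)
  | [], lst => some lst
  | xx :: rest, lst =>
    match PySem.List.pyGet? lst (x + xx), PySem.Str.pyGet? w xx with
    | some cell, some wc =>
      if cell = " " ∨ cell = String.ofList [wc] then
        SethGo x w rest (PySem.List.pySetD lst (x + xx) (String.ofList [wc]))
      else none
    | _, _ => none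

def Seth (x : Int) (y : Int) (w : String) (l : List (List String)) : List (List String) :=
  match PySem.List.pyGet? l y with
  | none => l      -- IndexError on l[y]: outside Pre_
  | some lst =>
    match SethGo x w (PySem.List.pyRange 0 (PySem.Str.len w) 1) lst with
    | none => l    -- 'return rl': rl = list(l) equals l as a value
    | some lst' => PySem.List.pySetD l y lst'   -- l[y] = lst; return l

-- ===== PORT B =====
-- B's validation predicate: row[x+i] == ' ' or row[x+i] == w[i] (false where Python raises, outside Pre_).
def pvCompat (x : Int) (w : String) (row : List String) (i : Int) : Bool :=
  match PySem.List.pyGet? row (x + i), PySem.Str.pyGet? w i with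
  | some cell, some wc => cell = " " || cell = String.ofList [wc]
  | _, _ => false

def Seth_alt (x : Int) (y : Int) (w : String) (l : List (List String)) : List (List String) :=
  match PySem.List.pyGet? l y with
  | none => l      -- IndexError on l[y]: outside Pre_
  | some row =>
    if (PySem.List.pyRange 0 (PySem.Str.len w) 1).all (pvCompat x w row) then
      PySem.List.pySetD l y        -- l[y] = lst; return l
        ((PySem.List.pyRange 0 (PySem.Str.len w) 1).foldl
          (fun acc i => PySem.List.pySetD acc (x + i) ((PySem.Str.pyGet? w i).elim "" (fun c => String.ofList [c]))) row)
    else l                         -- return list(l): equals l as a value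

-- ===== PRECONDITION & SPEC =====
-- Pre_ excludes the inputs where A raises IndexError (y out of range, or the scan reaching an
-- out-of-range cell before a mismatch), and additionally the corner where Python's negative-index
-- wraparound makes two scanned indices alias the same cell (x straddling 0 with len(row) < len(w)):
-- there A's early-return value reflects its own in-place write, an artefact of A's interleaved
-- mutation (B validates the untouched row first).
def Pre_Seth (x : Int) (y : Int) (w : String) (l : List (List String)) : Prop :=
  PySem.Raise.InRange l.length y ∧
  (0 ≤ x ∨ x + PySem.Str.len w ≤ 0 ∨ PySem.Str.len w ≤ ((PySem.List.pyGetD l y []).length : Int)) ∧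
  ∀ i : Nat, i < (PySem.Str.len w).toNat →
    (∀ j : Nat, j < i → pvCompat x w (PySem.List.pyGetD l y []) (j : Int) = true) →
    PySem.Raise.InRange (PySem.List.pyGetD l y []).length (x + (i : Int))
instance (x : Int) (y : Int) (w : String) (l : List (List String)) : Decidable (Pre_Seth x y w l) := by unfold Pre_Seth; infer_instance
def pvWitness_Seth : Int × Int × String × List (List String) := (0, 0, "ab", [[" ", "b"]])
def Spec_Seth (x : Int) (y : Int) (w : String) (l : List (List String)) (out : List (List String)) : Prop := out = Seth_alt x y w l
instance (x : Int) (y : Int) (w : String) (l : List (List String)) (out : List (List String)) : Decidable (Spec_Seth x y w l out) := by unfold Spec_Seth; infer_instance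

-- ===== CLAIM (what is proved, stated in full; the proofs are below) =====
def Claim_equal_Seth : Prop := ∀ (x : Int) (y : Int) (w : String) (l : List (List String)), Dom_Seth x y w l → Pre_Seth x y w l → Spec_Seth x y w l (Seth x y w l)

-- ===== LEMMAS AND PROOFS =====

-- Writing at python index p leaves every read at a differently-resolved index q unchanged.
lemma pyGet?_pySetD_ne {α : Type} (xs : List α) (p q : Int) (v : α)
    (h : ∀ kp kq, PySem.List.pyIdx? xs.length p = some kp →
      PySem.List.pyIdx? xs.length q = some kq → kp ≠ kq) :
    PySem.List.pyGet? (PySem.List.pySetD xs p v) q = PySem.List.pyGet? xs q := by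
  cases hp : PySem.List.pyIdx? xs.length p with
  | none => simp [PySem.List.pySetD, PySem.List.pySet?, hp]
  | some kp =>
    have hset : PySem.List.pySetD xs p v = xs.set kp v := by
      simp [PySem.List.pySetD, PySem.List.pySet?, hp]
    rw [hset]
    simp only [PySem.List.pyGet?, List.length_set]
    cases hq : PySem.List.pyIdx? xs.length q with
    | none => rfl
    | some kq =>
      show (xs.set kp v)[kq]? = xs[kq]?
      rw [List.getElem?_set_ne (h kp kq hp hq)]

-- A's scan-and-write loop equals B's validate-then-write, for indices whose resolved
-- positions are pairwise distinct, as long as lst agrees with row at every index still to visit.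
lemma SethGo_eq (x : Int) (w : String) (row : List String) :
    ∀ (is : List Int) (lst : List String), is.Nodup →
    lst.length = row.length →
    (∀ i ∈ is, ∀ j ∈ is, i ≠ j → ∀ kp kq, PySem.List.pyIdx? row.length (x + i) = some kp →
      PySem.List.pyIdx? row.length (x + j) = some kq → kp ≠ kq) →
    (∀ i ∈ is, PySem.List.pyGet? lst (x + i) = PySem.List.pyGet? row (x + i)) →
    SethGo x w is lst =
      (if is.all (pvCompat x w row) then
        some (is.foldl
          (fun acc i => PySem.List.pySetD acc (x + i) ((PySem.Str.pyGet? w i).elim "" (fun c => String.ofList [c]))) lst)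
       else none) := by
  intro is
  induction is with
  | nil => intro lst _ _ _ _; simp [SethGo]
  | cons i rest ih =>
    intro lst hnd hlen hdist hagree
    have hread : PySem.List.pyGet? lst (x + i) = PySem.List.pyGet? row (x + i) :=
      hagree i (by simp)
    simp only [SethGo, List.all_cons, List.foldl_cons]
    rw [hread]
    cases hr : PySem.List.pyGet? row (x + i) with
    | none =>
      have hcomp : pvCompat x w row i = false := by
        unfold pvCompat; rw [hr]
      rw [hcomp]
      cases PySem.Str.pyGet? w i <;> rfl
    | some cell =>
      cases hw : PySem.Str.pyGet? w i with
      | none =>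
        have hcomp : pvCompat x w row i = false := by
          unfold pvCompat; rw [hr, hw]
        rw [hcomp]
        rfl
      | some wc =>
        change (if cell = " " ∨ cell = String.ofList [wc] then
            SethGo x w rest (PySem.List.pySetD lst (x + i) (String.ofList [wc])) else none) = _
        by_cases hc : cell = " " ∨ cell = String.ofList [wc]
        · have hcomp : pvCompat x w row i = true := by
            unfold pvCompat; rw [hr, hw]
            rcases hc with h | h <;> simp [h]
          have hlen' : (PySem.List.pySetD lst (x + i) (String.ofList [wc])).length = row.length := by
            rw [PySem.List.length_pySetD, hlen]
          have hset : ∀ j ∈ rest,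
              PySem.List.pyGet? (PySem.List.pySetD lst (x + i) (String.ofList [wc])) (x + j)
                = PySem.List.pyGet? row (x + j) := by
            intro j hj
            have hne : i ≠ j := by
              intro h; exact (List.nodup_cons.mp hnd).1 (h ▸ hj)
            rw [pyGet?_pySetD_ne]
            · exact hagree j (by simp [hj])
            · intro kp kq hkp hkq
              rw [hlen] at hkp hkq
              exact hdist i (by simp) j (by simp [hj]) hne kp kq hkp hkq
          rw [if_pos hc,
            ih _ (List.nodup_cons.mp hnd).2 hlen'
              (fun a ha b hb hab => hdist a (by simp [ha]) b (by simp [hb]) hab) hset,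
            hcomp]
          rfl
        · have hcomp : pvCompat x w row i = false := by
            unfold pvCompat; rw [hr, hw]
            rw [not_or] at hc
            simp [hc.1, hc.2]
          rw [if_neg hc, hcomp]
          rfl

-- ===== VERDICT (by name: the statement is the Claim_ definition above) =====
theorem Seth_spec : Claim_equal_Seth := by
  intro x y w l _ hpre
  unfold Spec_Seth Seth Seth_alt
  cases hy : PySem.List.pyGet? l y with
  | none => rfl
  | some row =>
    have hrow : PySem.List.pyGetD l y [] = row := by
      simp [PySem.List.pyGetD, hy]
    unfold Pre_Seth at hpre
    rw [hrow] at hpre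
    have hdist : ∀ i ∈ PySem.List.pyRange 0 (PySem.Str.len w) 1,
        ∀ j ∈ PySem.List.pyRange 0 (PySem.Str.len w) 1, i ≠ j →
        ∀ kp kq, PySem.List.pyIdx? row.length (x + i) = some kp →
          PySem.List.pyIdx? row.length (x + j) = some kq → kp ≠ kq := by
      intro i hi j hj hne kp kq hkp hkq
      have hi' := (PySem.List.mem_pyRange_one).mp hi
      have hj' := (PySem.List.mem_pyRange_one).mp hj
      rcases hpre.2.1 with hs | hs | hs <;>
        (simp only [PySem.List.pyIdx?] at hkp hkq;
         split_ifs at hkp hkq <;>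
           first
             | exact Option.noConfusion hkp
             | exact Option.noConfusion hkq
             | (injection hkp with e1; injection hkq with e2; omega))
    have hgo := SethGo_eq x w row (PySem.List.pyRange 0 (PySem.Str.len w) 1) row
      (PySem.List.nodup_pyRange_one _ _) rfl hdist (fun _ _ => rfl)
    show (match SethGo x w (PySem.List.pyRange 0 (PySem.Str.len w) 1) row with
      | none => l
      | some lst' => PySem.List.pySetD l y lst') =
      (if (PySem.List.pyRange 0 (PySem.Str.len w) 1).all (pvCompat x w row) = true then
        PySem.List.pySetD l y
          ((PySem.List.pyRange 0 (PySem.Str.len w) 1).foldl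
            (fun acc i => PySem.List.pySetD acc (x + i) ((PySem.Str.pyGet? w i).elim "" (fun c => String.ofList [c]))) row)
      else l)
    rw [hgo]
    by_cases hall : (PySem.List.pyRange 0 (PySem.Str.len w) 1).all (pvCompat x w row) = true
    · rw [if_pos hall, if_pos hall]
    · rw [if_neg hall, if_neg hall]
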